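-- pv_equiv track=rewrite | github.com/SamuelSchlesinger/empirical-circuit-complexity | gen/generate.py | gen_if_tree
-- ===== SOURCE A (Python) =====
-- def truth_value(func_idx, input_idx):
--     """Get f_{func_idx}(input_{input_idx}). Bit input_idx of func_idx."""
--     return (func_idx >> input_idx) & 1
--
-- def gen_if_tree(n, func_idx, var=0, input_acc=0, indent=1):
--     """Generate nested if-then-else tree for the truth table."""
--     if var == n:
--         return "true" if truth_value(func_idx, input_acc) else "false"
--
--     inner = "  " * (indent + 1)
--     prefix = "  " * indent
--
--     then_body = gen_if_tree(n, func_idx, var + 1,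
--                             input_acc | (1 << var), indent + 1)
--     else_body = gen_if_tree(n, func_idx, var + 1,
--                             input_acc, indent + 1)
--
--     return (f"if x \u27e8{var}, by omega\u27e9 then\n"
--             f"{inner}{then_body}\n"
--             f"{prefix}else\n"
--             f"{inner}{else_body}")
-- ===== SOURCE B (Python) =====
-- def gen_if_tree(n, func_idx, var=0, input_acc=0, indent=1):
--     """Generate nested if-then-else tree for the truth table, built bottom-up.
--
--     First computes the row of leaf strings for every completion of the input
--     prefix, then repeatedly merges adjacent sibling subtrees, level by level,
--     until a single root string remains.
--     """
--     m = n - var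
--     level = ["true" if (func_idx >> (input_acc | (d << var))) & 1 else "false"
--              for d in range(1 << m)]
--     for k in reversed(range(m)):
--         prefix = "  " * (indent + k)
--         inner = "  " * (indent + k + 1)
--         level = ["if x \u27e8{}, by omega\u27e9 then\n{}{}\n{}else\n{}{}".format(
--                      var + k, inner, level[d + (1 << k)], prefix, inner, level[d])
--                  for d in range(1 << k)]
--     return level[0]
-- ===== Notes on version B (the rewrite author's own statement) =====
-- stated objective: alternative
-- what changed: Replaces A's top-down recursion with an iterative bottom-up build: B first materialises the whole row of 2^(n-var) leaf strings, then merges adjacent sibling strings level by level (a loop from var n-1 down to var) until one root string remains.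
-- outside the precondition, e.g. on gen_if_tree(-1, 1, -1, 0, 1): A returns 'true', B raises ValueError
import Mathlib
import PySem

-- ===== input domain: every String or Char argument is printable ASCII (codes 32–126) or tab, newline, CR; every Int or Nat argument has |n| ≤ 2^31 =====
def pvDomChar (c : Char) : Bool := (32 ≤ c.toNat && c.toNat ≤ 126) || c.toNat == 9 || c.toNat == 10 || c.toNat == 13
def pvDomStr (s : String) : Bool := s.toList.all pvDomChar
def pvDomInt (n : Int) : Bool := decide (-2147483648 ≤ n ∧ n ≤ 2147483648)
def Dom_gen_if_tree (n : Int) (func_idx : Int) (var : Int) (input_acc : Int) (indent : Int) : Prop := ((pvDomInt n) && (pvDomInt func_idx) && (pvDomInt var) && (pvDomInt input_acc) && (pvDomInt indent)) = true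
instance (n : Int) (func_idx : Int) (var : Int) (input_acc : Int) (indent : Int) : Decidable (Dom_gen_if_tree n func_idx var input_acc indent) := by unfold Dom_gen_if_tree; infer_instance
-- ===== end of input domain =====

-- B builds the if-tree bottom-up (leaf row, then level-by-level merging) instead of A's top-down
-- recursion; same return value, objective: alternative decomposition.

-- truth_value(func_idx, input_idx) = (func_idx >> input_idx) & 1; exact for input_idx ≥ 0 (Pre_),
-- Python raises ValueError on a negative shift count.
def pyTruthValue (func_idx : Int) (input_idx : Int) : Int :=
  PySem.Int.band (func_idx >>> input_idx.toNat) 1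

-- "  " * k  (Python string repetition; empty for k ≤ 0, exactly like Python)
def pyRepeat (k : Int) : String :=
  String.join (List.replicate k.toNat "  ")

-- ===== PORT A =====
-- fuel = n - var: each call either hits var == n or recurses with var + 1; within Pre_ (var ≤ n)
-- the fuel is exactly the Python recursion depth, so the `0` arm is never taken.
def gen_if_tree_go (fuel : Nat) (n : Int) (func_idx : Int) (var : Int) (input_acc : Int) (indent : Int) : String :=
  if var = n then
    if pyTruthValue func_idx input_acc ≠ 0 then "true" else "false"
  else
    match fuel with
    | 0 => ""
    | fuel' + 1 =>
      let inner := pyRepeat (indent + 1)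
      let pre := pyRepeat indent
      let then_body := gen_if_tree_go fuel' n func_idx (var + 1)
        (PySem.Int.bor input_acc (1 <<< var.toNat)) (indent + 1)
      let else_body := gen_if_tree_go fuel' n func_idx (var + 1) input_acc (indent + 1)
      "if x ⟨" ++ PySem.Int.toStr var ++ ", by omega⟩ then\n" ++ inner ++ then_body ++ "\n"
        ++ pre ++ "else\n" ++ inner ++ else_body

def gen_if_tree (n : Int) (func_idx : Int) (var : Int) (input_acc : Int) (indent : Int) : String :=
  gen_if_tree_go (n - var).toNat n func_idx var input_acc indent

-- ===== PORT B =====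
-- the body of B's `for k in reversed(range(m))` loop; list indices are in range, so List.getD is
-- exact for Python's level[...]
def gen_if_tree_altStep (var : Int) (indent : Int) (lvl : List String) (k : Nat) : List String :=
  (List.range (1 <<< k)).map (fun (d : Nat) =>
    "if x ⟨" ++ PySem.Int.toStr (var + (k : Int)) ++ ", by omega⟩ then\n"
      ++ pyRepeat (indent + (k : Int) + 1) ++ lvl.getD (d + (1 <<< k)) "" ++ "\n"
      ++ pyRepeat (indent + (k : Int)) ++ "else\n"
      ++ pyRepeat (indent + (k : Int) + 1) ++ lvl.getD d "")

def gen_if_tree_alt (n : Int) (func_idx : Int) (var : Int) (input_acc : Int) (indent : Int) : String :=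
  let m := (n - var).toNat
  let level0 : List String := (List.range (1 <<< m)).map (fun (d : Nat) =>
    if pyTruthValue func_idx (PySem.Int.bor input_acc ((d : Int) <<< var.toNat)) ≠ 0
    then "true" else "false")
  let level := ((List.range m).reverse).foldl (gen_if_tree_altStep var indent) level0
  level.getD 0 ""

-- ===== PRECONDITION & SPEC =====
-- A raises (ValueError / RecursionError) when var > n, var < n with var < 0, or input_acc < 0;
-- additionally 0 ≤ var excludes the degenerate corner var = n < 0, where A returns a leaf but B's
-- natural bottom-up indexing (d << var) raises ValueError — see claim.json cites.
def Pre_gen_if_tree (n : Int) (func_idx : Int) (var : Int) (input_acc : Int) (indent : Int) : Prop :=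
  0 ≤ var ∧ var ≤ n ∧ 0 ≤ input_acc
instance (n : Int) (func_idx : Int) (var : Int) (input_acc : Int) (indent : Int) : Decidable (Pre_gen_if_tree n func_idx var input_acc indent) := by unfold Pre_gen_if_tree; infer_instance

def pvWitness_gen_if_tree : Int × Int × Int × Int × Int := (2, 5, 0, 0, 1)

def Spec_gen_if_tree (n : Int) (func_idx : Int) (var : Int) (input_acc : Int) (indent : Int) (out : String) : Prop := out = gen_if_tree_alt n func_idx var input_acc indent
instance (n : Int) (func_idx : Int) (var : Int) (input_acc : Int) (indent : Int) (out : String) : Decidable (Spec_gen_if_tree n func_idx var input_acc indent out) := by unfold Spec_gen_if_tree; infer_instance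

-- ===== CLAIM (what is proved, stated in full; the proofs are below) =====
def Claim_equal_gen_if_tree : Prop := ∀ (n : Int) (func_idx : Int) (var : Int) (input_acc : Int) (indent : Int), Dom_gen_if_tree n func_idx var input_acc indent → Pre_gen_if_tree n func_idx var input_acc indent → Spec_gen_if_tree n func_idx var input_acc indent (gen_if_tree n func_idx var input_acc indent)

-- ===== LEMMAS AND PROOFS =====

lemma pv_two_pow_lor_eq_add {k x : Nat} (h : x < 2 ^ k) : 2 ^ k ||| x = 2 ^ k + x := by
  apply Nat.eq_of_testBit_eq
  intro i
  rcases lt_trichotomy i k with hi | hi | hi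
  · simp [Nat.ne_of_gt hi, Nat.testBit_two_pow_add_gt hi]
  · subst hi
    simp [Nat.testBit_two_pow_add_eq, Nat.testBit_lt_two_pow h]
  · have hx : x < 2 ^ i := lt_of_lt_of_le h (Nat.pow_le_pow_right (by norm_num) hi.le)
    have hs : 2 ^ k + x < 2 ^ i :=
      lt_of_lt_of_le (by omega : 2 ^ k + x < 2 ^ k + 2 ^ k)
        (by rw [← two_mul, ← pow_succ']; exact Nat.pow_le_pow_right (by norm_num) hi)
    simp [Nat.ne_of_lt hi, Nat.testBit_lt_two_pow hx,
      Nat.testBit_lt_two_pow hs]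

lemma pv_shift_merge (d j v : Nat) (h : d < 2 ^ j) :
    (d <<< v) ||| (1 <<< (v + j)) = (d + 2 ^ j) <<< v := by
  rw [Nat.lor_comm, Nat.shiftLeft_eq, Nat.shiftLeft_eq, Nat.shiftLeft_eq, one_mul,
    pv_two_pow_lor_eq_add (by rw [pow_add, Nat.mul_comm (2 ^ v)]; exact (Nat.mul_lt_mul_right (Nat.two_pow_pos v)).mpr h)]
  ring

lemma pv_cast_shiftLeft (a k : Nat) : ((a : Int) <<< k) = ((a <<< k : Nat) : Int) := by
  simp [Int.shiftLeft_eq, Nat.shiftLeft_eq]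

lemma pv_getD_map_range {g : Nat → String} {N i : Nat} (hi : i < N) :
    ((List.range N).map g).getD i "" = g i := by
  rw [List.getD_eq_getElem?_getD]
  simp [hi]

-- invariant of B's merging loop: after folding the levels j-1, …, down to 0 the single remaining
-- string is A's subtree of height j + t rooted at (var, acc, ind)
lemma pv_key (j : Nat) (n func_idx var acc ind : Int) :
    ∀ t : Nat, 0 ≤ var → 0 ≤ acc → var + (j : Int) + (t : Int) = n →
    ((List.range j).reverse).foldl (gen_if_tree_altStep var ind)
      ((List.range (1 <<< j)).map (fun (d : Nat) =>
        gen_if_tree_go t n func_idx (var + (j : Int))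
          (PySem.Int.bor acc ((d : Int) <<< var.toNat)) (ind + (j : Int))))
    = [gen_if_tree_go (j + t) n func_idx var acc ind] := by
  induction j with
  | zero =>
    intro t hv ha hn
    simp [PySem.Int.bor_zero]
  | succ j ih =>
    intro t hv ha hn
    rw [List.range_succ, List.reverse_append, List.reverse_singleton, List.singleton_append,
      List.foldl_cons]
    have hstep : gen_if_tree_altStep var ind
        ((List.range (1 <<< (j + 1))).map (fun (d : Nat) =>
          gen_if_tree_go t n func_idx (var + ((j + 1 : Nat) : Int))
            (PySem.Int.bor acc ((d : Int) <<< var.toNat)) (ind + ((j + 1 : Nat) : Int)))) j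
        = (List.range (1 <<< j)).map (fun (d : Nat) =>
            gen_if_tree_go (t + 1) n func_idx (var + (j : Int))
              (PySem.Int.bor acc ((d : Int) <<< var.toNat)) (ind + (j : Int))) := by
      unfold gen_if_tree_altStep
      apply List.map_congr_left
      intro d hd
      rw [List.mem_range] at hd
      have hd2 : d < 2 ^ j := by rwa [Nat.one_shiftLeft] at hd
      have h1 : d + (1 <<< j) < 1 <<< (j + 1) := by
        simp only [Nat.one_shiftLeft] at *; rw [pow_succ]; omega
      have h2 : d < 1 <<< (j + 1) := by
        simp only [Nat.one_shiftLeft] at *; rw [pow_succ]; omega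
      rw [pv_getD_map_range h1, pv_getD_map_range h2]
      have hne : var + (j : Int) ≠ n := by push_cast at hn ⊢; omega
      rw [gen_if_tree_go, if_neg hne]
      -- then-branch accumulator: acc | (d << var) | (1 << (var + j)) = acc | ((d + 2^j) << var)
      have hacc : PySem.Int.bor (PySem.Int.bor acc ((d : Int) <<< var.toNat))
            (1 <<< (var + (j : Int)).toNat)
          = PySem.Int.bor acc (((d + (1 <<< j) : Nat) : Int) <<< var.toNat) := by
        obtain ⟨a, rfl⟩ := Int.eq_ofNat_of_zero_le ha
        have hvj : (var + (j : Int)).toNat = var.toNat + j := by omega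
        rw [hvj, pv_cast_shiftLeft, pv_cast_shiftLeft]
        rw [PySem.Int.bor_natCast, PySem.Int.bor_natCast, PySem.Int.bor_natCast]
        congr 1
        rw [Nat.lor_assoc, pv_shift_merge d j var.toNat hd2, Nat.one_shiftLeft]
      rw [hacc]
      have e1 : var + ((j + 1 : Nat) : Int) = var + (j : Int) + 1 := by push_cast; ring
      have e2 : ind + ((j + 1 : Nat) : Int) = ind + (j : Int) + 1 := by push_cast; ring
      simp only [e1, e2]
    rw [hstep, show j + 1 + t = j + (t + 1) from by omega]
    exact ih (t + 1) hv ha (by push_cast at hn ⊢; omega)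

-- ===== VERDICT (by name: the statement is the Claim_ definition above) =====
theorem gen_if_tree_spec : Claim_equal_gen_if_tree := by
  intro n func_idx var input_acc indent _ hpre
  obtain ⟨hv, hvn, ha⟩ := hpre
  unfold Spec_gen_if_tree
  simp only [gen_if_tree, gen_if_tree_alt]
  have hm : var + (((n - var).toNat : Nat) : Int) + ((0 : Nat) : Int) = n := by
    push_cast; omega
  have hleaf : (List.range (1 <<< (n - var).toNat)).map (fun (d : Nat) =>
        if pyTruthValue func_idx (PySem.Int.bor input_acc ((d : Int) <<< var.toNat)) ≠ 0
        then "true" else "false")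
      = (List.range (1 <<< (n - var).toNat)).map (fun (d : Nat) =>
        gen_if_tree_go 0 n func_idx (var + (((n - var).toNat : Nat) : Int))
          (PySem.Int.bor input_acc ((d : Int) <<< var.toNat))
          (indent + (((n - var).toNat : Nat) : Int))) := by
    apply List.map_congr_left
    intro d _
    rw [gen_if_tree_go, if_pos (show var + (((n - var).toNat : Nat) : Int) = n by omega)]
  rw [hleaf, pv_key (n - var).toNat n func_idx var input_acc indent 0 hv ha hm]
  simp
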